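-- pv_equiv track=rewrite | github.com/edwardsp/cyclecloud-slurm | slurm/test/slurmcc_test/testutil.py | _show_hostnames
-- ===== SOURCE A (Python) =====
-- from typing import Dict, List
--
-- def _show_hostnames(expr: str) -> List[str]:
--     """
--     Purely used to mimic scontrol
--     """
--     ret = []
--     if "," in expr:
--         for sub_expr in expr.split(","):
--             ret.extend(_show_hostnames(sub_expr))
--         return ret
--
--     if "[" in expr:
--         left, right = expr.rindex("["), expr.rindex("]")
--         range_expr = expr[left + 1 : right].strip()
--         if "-" in range_expr:
--             start, stop = range_expr.split("-")
--             for i in range(int(start), int(stop) + 1):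
--                 new_expr = expr[:left] + str(i) + expr[right + 1 :]
--                 ret.extend(_show_hostnames(new_expr))
--         return ret
--     else:
--         return [expr]
-- ===== SOURCE B (Python) =====
-- from typing import List
--
--
-- def _show_hostnames(expr: str) -> List[str]:
--     """
--     Purely used to mimic scontrol
--     """
--     ret = []
--     stack = [expr]
--     while stack:
--         e = stack.pop()
--         if "," in e:
--             stack.extend(reversed(e.split(",")))
--         elif "[" in e:
--             left, right = e.rindex("["), e.rindex("]")
--             range_expr = e[left + 1 : right].strip()
--             if "-" in range_expr:
--                 start, stop = range_expr.split("-")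
--                 for i in reversed(range(int(start), int(stop) + 1)):
--                     stack.append(e[:left] + str(i) + e[right + 1 :])
--         else:
--             ret.append(e)
--     return ret
-- ===== Notes on version B (the rewrite author's own statement) =====
-- stated objective: alternative
-- what changed: Replaces A's recursive descent by an iterative explicit LIFO work-stack loop (children pushed in reverse), eliminating recursion while keeping the same operations and depth-first output order.
import Mathlib
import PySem

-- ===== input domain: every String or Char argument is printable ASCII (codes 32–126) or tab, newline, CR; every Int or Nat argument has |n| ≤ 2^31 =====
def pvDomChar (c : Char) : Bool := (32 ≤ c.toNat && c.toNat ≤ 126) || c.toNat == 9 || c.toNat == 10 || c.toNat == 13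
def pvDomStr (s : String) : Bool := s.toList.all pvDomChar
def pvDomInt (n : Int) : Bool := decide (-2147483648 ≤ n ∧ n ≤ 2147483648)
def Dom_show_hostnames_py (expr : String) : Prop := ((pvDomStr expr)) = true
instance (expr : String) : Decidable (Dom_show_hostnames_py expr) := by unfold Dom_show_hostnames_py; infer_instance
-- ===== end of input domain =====

-- B replaces A's recursion by an explicit LIFO work-stack loop (children pushed in reverse), same
-- operations and output order; A = B proved on Pre_, which excludes exactly the inputs where A raises.


-- ===== PORT A =====
-- shared straight transcriptions of A's scalar steps: left, right, range_expr, new_expr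
def pvL (e : String) : Int := PySem.Str.rfind e "["
def pvR (e : String) : Int := PySem.Str.rfind e "]"
def pvBody (e : String) : String :=
  PySem.Str.strip (PySem.Str.slice e (some (pvL e + 1)) (some (pvR e)))
def pvPfx (e : String) : String := PySem.Str.slice e none (some (pvL e))
def pvSfx (e : String) : String := PySem.Str.slice e (some (pvR e + 1)) none
def pvChild (e : String) (i : Int) : String := pvPfx e ++ PySem.Int.toStr i ++ pvSfx e

-- literal port of A's recursive body; 'rec' is the recursive call (fuel-indexed below)
def goAStep (rec : String → List String) (e : String) : List String :=
  if PySem.Str.isIn "," e then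
    ((PySem.Str.split? e ",").getD []).foldl (fun ret s => ret ++ rec s) []
  else if PySem.Str.isIn "[" e then
    if PySem.Str.isIn "]" e then
      if PySem.Str.isIn "-" (pvBody e) then
        match PySem.Str.split? (pvBody e) "-" with
        | some [start, stop] =>
          match PySem.Int.ofStr? start, PySem.Int.ofStr? stop with
          | some a, some b =>
            (PySem.List.pyRange a (b + 1) 1).foldl (fun ret i => ret ++ rec (pvChild e i)) []
          | _, _ => []  -- int() ValueError: outside Pre_
        | _ => []       -- unpacking ≠ 2 parts, ValueError: outside Pre_
      else []
    else []             -- rindex("]") ValueError: outside Pre_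
  else [e]

-- fuel bounds the recursion depth; on every input Pre_ admits the depth is ≤ '['-count + 2 ≤ length + 1
def goA : Nat → String → List String
  | 0, _ => []
  | fuel+1, e => goAStep (goA fuel) e

def show_hostnames_py (expr : String) : List String := goA (expr.toList.length + 1) expr

-- ===== PORT B =====
-- B's loop body: the stack is modelled head = top (Python pops from the end), so Python's
-- stack.extend(reversed(children)) is 'children ++ stack' here; 'recur' is the next loop iteration
def runBStep (recur : List String → List String → List String)
    (e : String) (stack ret : List String) : List String :=
  if PySem.Str.isIn "," e then
    recur (((PySem.Str.split? e ",").getD []) ++ stack) ret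
  else if PySem.Str.isIn "[" e then
    if PySem.Str.isIn "]" e then
      if PySem.Str.isIn "-" (pvBody e) then
        match PySem.Str.split? (pvBody e) "-" with
        | some [start, stop] =>
          match PySem.Int.ofStr? start, PySem.Int.ofStr? stop with
          | some a, some b =>
            recur ((PySem.List.pyRange a (b + 1) 1).map (fun i => pvChild e i) ++ stack) ret
          | _, _ => ret  -- int() ValueError: outside Pre_
        | _ => ret       -- unpacking ≠ 2 parts, ValueError: outside Pre_
      else recur stack ret
    else ret             -- rindex("]") ValueError: outside Pre_
  else recur stack (ret ++ [e])

def runB : Nat → List String → List String → List String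
  | 0, _, ret => ret
  | _+1, [], ret => ret
  | fuel+1, e :: stack, ret => runBStep (runB fuel) e stack ret

-- the parsed "start-stop" bracket body (only a fuel/Pre_ helper, not part of the loop body)
def pvParse? (body : String) : Option (Int × Int) :=
  match PySem.Str.split? body "-" with
  | some [s, t] =>
    match PySem.Int.ofStr? s, PySem.Int.ofStr? t with
    | some a, some b => some (a, b)
    | _, _ => none
  | _ => none

-- fuel guard for B's while-loop (1 pop per element; the recursion depth shrinks with the '['-count,
-- so the seed fuel 'length of the part' below is always enough)
def needBStep (rec : String → Nat) (e : String) : Nat :=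
  if PySem.Str.isIn "[" e && PySem.Str.isIn "]" e && PySem.Str.isIn "-" (pvBody e) then
    match pvParse? (pvBody e) with
    | some (a, b) =>
      1 + ((PySem.List.pyRange a (b + 1) 1).map (fun i => rec (pvChild e i))).sum
    | none => 1
  else 1

def needB : Nat → String → Nat
  | 0, _ => 1
  | f+1, e => needBStep (needB f) e

def show_hostnames_py_alt (expr : String) : List String :=
  runB (1 + (((PySem.Str.split? expr ",").getD []).map (fun p => needB p.toList.length p)).sum)
    [expr] []

-- ===== PRECONDITION & SPEC =====
-- well-formedness of a comma-free part's bracket-group structure, scanned from the right exactly as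
-- far as expansion reaches: the fuel argument only feeds the strictly shrinking prefix recursion
-- (seeded with the part's length); it never runs either algorithm
def goGoodStep (rec : String → Bool) (e : String) : Bool :=
  if PySem.Str.isIn "[" e then
    if PySem.Str.isIn "]" e then
      if PySem.Str.isIn "-" (pvBody e) then
        match pvParse? (pvBody e) with
        | some (a, b) => decide (b + 1 ≤ a) || rec (pvPfx e)
        | none => false
      else true
    else false
  else true

def goGood : Nat → String → Bool
  | 0, _ => true
  | f+1, e => goGoodStep (goGood f) e

def GoodC (e : String) : Bool := goGood e.toList.length e

-- Pre_ excludes exactly the inputs on which A raises ValueError: some comma part, following the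
-- bracket groups right-to-left through the groups that actually expand, has an opening bracket with
-- no closing bracket, or a dash-containing bracket body that does not split into exactly two
-- int()-parseable pieces.
def Pre_show_hostnames_py (expr : String) : Prop :=
  ∀ p ∈ (PySem.Str.split? expr ",").getD [], GoodC p = true
instance (expr : String) : Decidable (Pre_show_hostnames_py expr) := by
  unfold Pre_show_hostnames_py; infer_instance

def pvWitness_show_hostnames_py : String := "a[1-3],b"

def Spec_show_hostnames_py (expr : String) (out : List String) : Prop := out = show_hostnames_py_alt expr
instance (expr : String) (out : List String) : Decidable (Spec_show_hostnames_py expr out) := by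
  unfold Spec_show_hostnames_py; infer_instance

-- ===== CLAIM (what is proved, stated in full; the proofs are below) =====
def Claim_equal_show_hostnames_py : Prop := ∀ (expr : String), Dom_show_hostnames_py expr → Pre_show_hostnames_py expr → Spec_show_hostnames_py expr (show_hostnames_py expr)

-- ===== LEMMAS AND PROOFS =====

lemma pv_infix_single (c : Char) (l : List Char) : [c] <:+: l ↔ c ∈ l := by
  constructor
  · intro h; exact h.subset (by simp)
  · intro h; obtain ⟨s, t, rfl⟩ := List.append_of_mem h; exact ⟨s, t, by simp⟩

lemma pv_isIn_eq {u : String} {c : Char} (hu : u.toList = [c]) (s : String) :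
    PySem.Str.isIn u s = decide (c ∈ s.toList) := by
  by_cases h : c ∈ s.toList
  · simp only [h, decide_true]
    exact (PySem.Str.isIn_iff_infix u s).2 (by rw [hu]; exact (pv_infix_single c s.toList).2 h)
  · simp only [h, decide_false]
    rw [← Bool.not_eq_true]
    intro hIn
    exact h ((pv_infix_single c s.toList).1 (by rw [← hu]; exact (PySem.Str.isIn_iff_infix u s).1 hIn))

lemma pv_splitOn_no_sep_go (sep l : List Char) (h : ¬ sep <:+: l) :
    ∀ fuel cur acc, PySem.Chars.splitOn.go sep fuel l cur acc = ((cur.reverse ++ l) :: acc).reverse := by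
  induction l with
  | nil =>
    intro fuel cur acc; cases fuel <;> simp [PySem.Chars.splitOn.go]
  | cons c rest ih =>
    intro fuel cur acc
    cases fuel with
    | zero => simp [PySem.Chars.splitOn.go]
    | succ f =>
      have hpre : sep.isPrefixOf (c :: rest) = false := by
        rw [← Bool.not_eq_true, List.isPrefixOf_iff_prefix]
        exact fun hp => h hp.isInfix
      have hrest : ¬ sep <:+: rest := fun hr => h (hr.trans (List.suffix_cons c rest).isInfix)
      simp only [PySem.Chars.splitOn.go, hpre]
      rw [ih hrest f (c :: cur) acc]
      simp

lemma pv_split?_no_sep (s : String) {c : Char} (u : String) (hu : u.toList = [c])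
    (h : c ∉ s.toList) : PySem.Str.split? s u = some [s] := by
  have hinf : ¬ [c] <:+: s.toList := fun hi => h ((pv_infix_single c s.toList).1 hi)
  simp only [PySem.Str.split?, PySem.Chars.split?, hu]
  rw [PySem.Chars.splitOn, pv_splitOn_no_sep_go [c] s.toList hinf]
  simp

lemma pv_split_self (e : String) (hc : ',' ∉ e.toList) :
    (PySem.Str.split? e ",").getD [] = [e] := by
  rw [pv_split?_no_sep e "," (by decide) hc]
  rfl

lemma pv_toStr_not_mem {c : Char} (hc : c.isDigit = false) (hm : c ≠ '-') (i : Int) :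
    c ∉ (PySem.Int.toStr i).toList := by
  intro h
  simp only [PySem.Int.toStr, String.toList_ofList, PySem.Int.toChars] at h
  split at h
  · rcases List.mem_cons.1 h with h | h
    · exact hm h
    · rw [Nat.isDigit_of_mem_toDigits (by norm_num) (by norm_num) h] at hc; cases hc
  · rw [Nat.isDigit_of_mem_toDigits (by norm_num) (by norm_num) h] at hc; cases hc

lemma pv_last_decomp {c : Char} {s : List Char} (h : c ∈ s) :
    ∃ u v, s = u ++ c :: v ∧ c ∉ v := by
  induction s with
  | nil => cases h
  | cons x t ih =>
    by_cases ht : c ∈ t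
    · obtain ⟨u, v, rfl, hv⟩ := ih ht
      exact ⟨x :: u, v, rfl, hv⟩
    · rcases List.mem_cons.1 h with rfl | h'
      · exact ⟨[], t, rfl, ht⟩
      · exact absurd h' ht

lemma pv_isPrefix_single_false {c : Char} {l : List Char} (h : c ∉ l) (k : Nat) :
    [c].isPrefixOf (l.drop k) = false := by
  rcases hl : l.drop k with _ | ⟨a, t⟩
  · rfl
  · have ha : a ∈ l := List.mem_of_mem_drop (by rw [hl]; simp)
    have hac : ¬ (c = a) := fun hca => h (hca ▸ ha)
    simp [List.isPrefixOf, hac]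

lemma pv_rfind_go_eq (c : Char) (u v : List Char) (hv : c ∉ v) :
    ∀ j, u.length ≤ j → PySem.Chars.rfind.go (u ++ c :: v) [c] j = (u.length : Int) := by
  intro j
  induction j with
  | zero =>
    intro hj
    have hu : u = [] := List.eq_nil_of_length_eq_zero (Nat.le_zero.mp hj)
    subst hu
    simp [PySem.Chars.rfind.go, List.isPrefixOf]
  | succ j ih =>
    intro hj
    rw [PySem.Chars.rfind.go]
    by_cases he : u.length = j + 1
    · have hdrop : (u ++ c :: v).drop (j + 1) = c :: v := by
        rw [← he, List.drop_left]
      rw [hdrop]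
      simp [List.isPrefixOf, he]
    · have hlt : u.length ≤ j := by omega
      have hfalse : [c].isPrefixOf ((u ++ c :: v).drop (j + 1)) = false := by
        have h1 : (u ++ c :: v).drop (j + 1) = (c :: v).drop (j + 1 - u.length) := by
          rw [List.drop_append, List.drop_eq_nil_of_le (by omega), List.nil_append]
        rw [h1, show j + 1 - u.length = (j - u.length) + 1 from by omega, List.drop_succ_cons]
        exact pv_isPrefix_single_false hv _
      rw [hfalse]
      simp only [Bool.false_eq_true, if_false]
      exact ih hlt

lemma pv_rfind_eq_of_decomp {c : Char} {s u v : List Char} (hs : s = u ++ c :: v) (hv : c ∉ v) :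
    PySem.Chars.rfind s [c] = (u.length : Int) := by
  subst hs
  rw [PySem.Chars.rfind]
  exact pv_rfind_go_eq c u v hv _ (by simp)

lemma pv_slice_toList (e : String) {a b : Int} (ha : 0 ≤ a) (hb0 : 0 ≤ b) :
    (PySem.Str.slice e (some a) (some b)).toList = (e.toList.drop a.toNat).take (b.toNat - a.toNat) := by
  rw [PySem.Str.toList_slice, PySem.Chars.slice_eq_listSlice, PySem.List.slice_toNat _ ha hb0]

lemma pv_pfx_of_decomp (e : String) {u v : List Char} (he : e.toList = u ++ '[' :: v)
    (hv : '[' ∉ v) : pvL e = (u.length : Int) ∧ (pvPfx e).toList = u := by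
  have hL : pvL e = (u.length : Int) := by
    unfold pvL
    rw [PySem.Str.rfind_eq, show ("[" : String).toList = ['['] from by decide]
    exact pv_rfind_eq_of_decomp he hv
  refine ⟨hL, ?_⟩
  unfold pvPfx
  rw [PySem.Str.toList_slice, PySem.Chars.slice_eq_listSlice, hL,
    PySem.List.slice_to _ (by positivity)]
  rw [show ((u.length : Int)).toNat = u.length from by omega, he,
    List.take_append_of_le_length (le_refl _), List.take_length]

lemma pv_sfx_of_decomp (e : String) {w z : List Char} (he : e.toList = w ++ ']' :: z)
    (hz : ']' ∉ z) : pvR e = (w.length : Int) ∧ (pvSfx e).toList = z := by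
  have hR : pvR e = (w.length : Int) := by
    unfold pvR
    rw [PySem.Str.rfind_eq, show ("]" : String).toList = [']'] from by decide]
    exact pv_rfind_eq_of_decomp he hz
  refine ⟨hR, ?_⟩
  unfold pvSfx
  rw [PySem.Str.toList_slice, PySem.Chars.slice_eq_listSlice, hR,
    PySem.List.slice_from _ (by positivity)]
  rw [show ((w.length : Int) + 1).toNat = w.length + 1 from by omega, he,
    List.drop_append, List.drop_eq_nil_of_le (by omega), List.nil_append,
    show w.length + 1 - w.length = 1 from by omega, List.drop_one, List.tail_cons]

lemma pv_mem_strip {x : Char} {s : List Char} (h : x ∈ PySem.Chars.strip s) : x ∈ s := by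
  unfold PySem.Chars.strip PySem.Chars.rstrip PySem.Chars.lstrip at h
  have h1 := List.mem_reverse.mp h
  have h2 := (List.dropWhile_sublist _).subset h1
  have h3 := List.mem_reverse.mp h2
  exact (List.dropWhile_sublist _).subset h3

lemma pv_suffix_sub {x : Char} (e : String) (u v w z : List Char)
    (heu : e.toList = u ++ '[' :: v) (hew : e.toList = w ++ ']' :: z)
    (hlr : u.length < w.length) (hmem : x ∈ z) : x ∈ v := by
  have hzdrop : e.toList.drop (w.length + 1) = z := by
    rw [hew, List.drop_append, List.drop_eq_nil_of_le (by omega), List.nil_append,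
      show w.length + 1 - w.length = 1 from by omega, List.drop_one, List.tail_cons]
  have hvdrop : e.toList.drop (u.length + 1) = v := by
    rw [heu, List.drop_append, List.drop_eq_nil_of_le (by omega), List.nil_append,
      show u.length + 1 - u.length = 1 from by omega, List.drop_one, List.tail_cons]
  have h5 : z = v.drop (w.length - u.length) := by
    have h6 : v.drop (w.length - u.length) = e.toList.drop (w.length + 1) := by
      rw [← hvdrop, List.drop_drop]
      congr 1
      omega
    rw [h6, hzdrop]
  rw [h5] at hmem
  exact List.mem_of_mem_drop hmem

-- the full context of an expanding bracket step
lemma pv_ctx (e : String) (hb : '[' ∈ e.toList) (hrb : ']' ∈ e.toList)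
    (hd : '-' ∈ (pvBody e).toList) :
    ∃ u v w z : List Char,
      e.toList = u ++ '[' :: v ∧ '[' ∉ v ∧ pvL e = (u.length : Int) ∧ (pvPfx e).toList = u ∧
      e.toList = w ++ ']' :: z ∧ ']' ∉ z ∧ pvR e = (w.length : Int) ∧ (pvSfx e).toList = z ∧
      u.length < w.length ∧ '[' ∉ z := by
  obtain ⟨u, v, heu, hv⟩ := pv_last_decomp hb
  obtain ⟨hL, hpfx⟩ := pv_pfx_of_decomp e heu hv
  obtain ⟨w, z, hew, hz⟩ := pv_last_decomp hrb
  obtain ⟨hR, hsfx⟩ := pv_sfx_of_decomp e hew hz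
  have hbody : '-' ∈ (PySem.Str.slice e (some (pvL e + 1)) (some (pvR e))).toList := by
    unfold pvBody at hd
    rw [PySem.Str.toList_strip] at hd
    exact pv_mem_strip hd
  have hslice : (PySem.Str.slice e (some (pvL e + 1)) (some (pvR e))).toList
      = (e.toList.drop (u.length + 1)).take (w.length - (u.length + 1)) := by
    rw [hL, hR, pv_slice_toList e (by positivity) (by positivity),
      show ((u.length : Int) + 1).toNat = u.length + 1 from by omega,
      show ((w.length : Int)).toNat = w.length from by omega]
  rw [hslice] at hbody
  have hlr : u.length < w.length := by
    by_contra hcon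
    have : w.length - (u.length + 1) = 0 := by omega
    rw [this] at hbody
    simp at hbody
  have hzv : '[' ∉ z := fun hmem => hv (pv_suffix_sub e u v w z heu hew hlr hmem)
  exact ⟨u, v, w, z, heu, hv, hL, hpfx, hew, hz, hR, hsfx, hlr, hzv⟩

lemma pv_parse_some {body : String} {a b : Int} (h : pvParse? body = some (a, b)) :
    ∃ s t, PySem.Str.split? body "-" = some [s, t] ∧
      PySem.Int.ofStr? s = some a ∧ PySem.Int.ofStr? t = some b := by
  unfold pvParse? at h
  rcases hsp : PySem.Str.split? body "-" with _ | l <;> rw [hsp] at h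
  · replace h : (none : Option (Int × Int)) = some (a, b) := h
    cases h
  · rcases l with _ | ⟨s, _ | ⟨t, _ | _⟩⟩
    · replace h : (none : Option (Int × Int)) = some (a, b) := h
      cases h
    · replace h : (none : Option (Int × Int)) = some (a, b) := h
      cases h
    · refine ⟨s, t, rfl, ?_⟩
      replace h : (match PySem.Int.ofStr? s, PySem.Int.ofStr? t with
        | some a', some b' => some (a', b') | _, _ => none) = some (a, b) := h
      rcases ha : PySem.Int.ofStr? s with _ | a' <;> rw [ha] at h
      · replace h : (none : Option (Int × Int)) = some (a, b) := h
        cases h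
      · rcases hb2 : PySem.Int.ofStr? t with _ | b' <;> rw [hb2] at h
        · replace h : (none : Option (Int × Int)) = some (a, b) := h
          cases h
        · replace h : (some (a', b') : Option (Int × Int)) = some (a, b) := h
          simp only [Option.some_inj, Prod.mk.injEq] at h
          obtain ⟨rfl, rfl⟩ := h
          exact ⟨rfl, rfl⟩
    · replace h : (none : Option (Int × Int)) = some (a, b) := h
      cases h

lemma pv_goGood_no_bracket {e : String} (h : '[' ∉ e.toList) : ∀ f, goGood f e = true := by
  intro f
  cases f with
  | zero => rfl
  | succ f =>
    rw [goGood, goGoodStep, pv_isIn_eq (u := "[") (c := '[') (by decide)]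
    simp [h]

lemma pv_goGood_stable : ∀ f f' (e : String), e.toList.length ≤ f → e.toList.length ≤ f' →
    goGood f e = goGood f' e := by
  intro f
  induction f with
  | zero =>
    intro f' e h0 _
    have hnil : e.toList = [] := List.eq_nil_of_length_eq_zero (Nat.le_zero.mp h0)
    have hb : '[' ∉ e.toList := by rw [hnil]; simp
    rw [pv_goGood_no_bracket hb, pv_goGood_no_bracket hb]
  | succ f ih =>
    intro f' e hf hf'
    by_cases hb : '[' ∈ e.toList
    · have hlen : 0 < e.toList.length := List.length_pos_of_mem hb
      cases f' with
      | zero => omega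
      | succ f'' =>
        obtain ⟨u, v, heu, hv⟩ := pv_last_decomp hb
        obtain ⟨hL, hpfx⟩ := pv_pfx_of_decomp e heu hv
        have hulen : u.length < e.toList.length := by rw [heu]; simp
        have hrec := ih f'' (pvPfx e) (by rw [hpfx]; omega) (by rw [hpfx]; omega)
        rw [goGood, goGood, goGoodStep, goGoodStep, hrec]
    · rw [pv_goGood_no_bracket hb, pv_goGood_no_bracket hb]

lemma pv_slice_eq_append {T P : String} {t : List Char} (hT : T.toList = P.toList ++ t)
    {a b : Int} (ha : 0 ≤ a) (hb0 : 0 ≤ b) (hbl : b.toNat ≤ P.toList.length) :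
    (PySem.Str.slice T (some a) (some b)).toList = (PySem.Str.slice P (some a) (some b)).toList := by
  rw [pv_slice_toList _ ha hb0, pv_slice_toList _ ha hb0, hT]
  by_cases hal : a.toNat ≤ P.toList.length
  · rw [List.drop_append_of_le_length hal,
      List.take_append_of_le_length (by rw [List.length_drop]; omega)]
  · have h0 : b.toNat - a.toNat = 0 := by omega
    simp [h0]

lemma pv_body_ext (PT P : String) (t : List Char) (hPT : PT.toList = P.toList ++ t)
    (n k : Nat) (hLT : pvL PT = (n : Int)) (hLP : pvL P = (n : Int))
    (hRT : pvR PT = (k : Int)) (hRP : pvR P = (k : Int)) (hk : k ≤ P.toList.length) :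
    pvBody PT = pvBody P := by
  apply String.toList_inj.mp
  unfold pvBody
  rw [PySem.Str.toList_strip, PySem.Str.toList_strip, hLT, hRT, hLP, hRP]
  exact congrArg PySem.Chars.strip
    (pv_slice_eq_append hPT (by positivity) (by positivity) (by omega))

lemma pv_goGood_ext : ∀ f (PT P : String) (t : List Char), PT.toList = P.toList ++ t →
    '[' ∉ t → ']' ∉ t → PT.toList.length ≤ f → goGood f PT = GoodC P := by
  intro f
  induction f with
  | zero =>
    intro PT P t hPT _ _ hlen
    have h1 : PT.toList = [] := List.eq_nil_of_length_eq_zero (Nat.le_zero.mp hlen)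
    have h2 : P.toList = [] := by
      have h3 : P.toList ++ t = [] := by rw [← hPT, h1]
      exact (List.append_eq_nil_iff.mp h3).1
    have hbT : '[' ∉ PT.toList := by rw [h1]; simp
    have hbP : '[' ∉ P.toList := by rw [h2]; simp
    rw [pv_goGood_no_bracket hbT, GoodC, pv_goGood_no_bracket hbP]
  | succ f ih =>
    intro PT P t hPT ht1 ht2 hlen
    by_cases hbP : '[' ∈ P.toList
    case neg =>
      have hbT : '[' ∉ PT.toList := by
        rw [hPT]
        simp only [List.mem_append]
        rintro (h | h)
        · exact hbP h
        · exact ht1 h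
      rw [pv_goGood_no_bracket hbT, GoodC, pv_goGood_no_bracket hbP]
    case pos =>
      obtain ⟨u, v, heu, hv⟩ := pv_last_decomp hbP
      have hPTd : PT.toList = u ++ '[' :: (v ++ t) := by rw [hPT, heu]; simp
      have hvt : '[' ∉ v ++ t := by
        simp only [List.mem_append]
        rintro (h | h)
        · exact hv h
        · exact ht1 h
      obtain ⟨hLP, hpfxP⟩ := pv_pfx_of_decomp P heu hv
      obtain ⟨hLT, hpfxT⟩ := pv_pfx_of_decomp PT hPTd hvt
      have hbT : '[' ∈ PT.toList := by rw [hPTd]; simp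
      have hpfx_eq : pvPfx PT = pvPfx P := String.toList_inj.mp (by rw [hpfxT, hpfxP])
      have hulenP : u.length < P.toList.length := by rw [heu]; simp
      obtain ⟨m, hm⟩ : ∃ m, P.toList.length = m + 1 :=
        ⟨P.toList.length - 1, by have := List.length_pos_of_mem hbP; omega⟩
      by_cases hrbP : ']' ∈ P.toList
      case neg =>
        have hrbT : ']' ∉ PT.toList := by
          rw [hPT]
          simp only [List.mem_append]
          rintro (h | h)
          · exact hrbP h
          · exact ht2 h
        rw [goGood, goGoodStep, pv_isIn_eq (u := "[") (c := '[') (by decide),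
          pv_isIn_eq (u := "]") (c := ']') (by decide)]
        simp only [hbT, decide_true, if_true, hrbT, decide_false, Bool.false_eq_true, if_false]
        rw [GoodC, hm, goGood, goGoodStep, pv_isIn_eq (u := "[") (c := '[') (by decide),
          pv_isIn_eq (u := "]") (c := ']') (by decide)]
        simp [hbP, hrbP]
      case pos =>
        obtain ⟨w, z, hew, hz⟩ := pv_last_decomp hrbP
        have hPTw : PT.toList = w ++ ']' :: (z ++ t) := by rw [hPT, hew]; simp
        have hzt : ']' ∉ z ++ t := by
          simp only [List.mem_append]
          rintro (h | h)
          · exact hz h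
          · exact ht2 h
        obtain ⟨hRP, _⟩ := pv_sfx_of_decomp P hew hz
        obtain ⟨hRT, _⟩ := pv_sfx_of_decomp PT hPTw hzt
        have hrbT : ']' ∈ PT.toList := by rw [hPTw]; simp
        have hwlen : w.length < P.toList.length := by rw [hew]; simp
        have hbody : pvBody PT = pvBody P :=
          pv_body_ext PT P t hPT u.length w.length hLT hLP hRT hRP (by omega)
        rw [goGood, goGoodStep, pv_isIn_eq (u := "[") (c := '[') (by decide),
          pv_isIn_eq (u := "]") (c := ']') (by decide)]
        simp only [hbT, hrbT, decide_true, if_true]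
        rw [hbody, hpfx_eq]
        rw [GoodC, hm, goGood, goGoodStep, pv_isIn_eq (u := "[") (c := '[') (by decide),
          pv_isIn_eq (u := "]") (c := ']') (by decide)]
        simp only [hbP, hrbP, decide_true, if_true]
        have hPTlen : P.toList.length ≤ PT.toList.length := by rw [hPT]; simp
        rw [pv_goGood_stable f m (pvPfx P) (by rw [hpfxP]; omega) (by rw [hpfxP]; omega)]

lemma pv_goA_terminal (e : String) (f : Nat) (hc : ',' ∉ e.toList) (hb : '[' ∉ e.toList) :
    goA (f + 1) e = [e] := by
  rw [goA, goAStep]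
  rw [pv_isIn_eq (u := ",") (c := ',') (by decide), pv_isIn_eq (u := "[") (c := '[') (by decide)]
  simp [hc, hb]

lemma pv_runB_nil (g : Nat) (ret : List String) : runB g [] ret = ret := by
  cases g <;> rfl

lemma pv_needB_one {e : String} (fb : Nat)
    (h : ¬ ('[' ∈ e.toList ∧ ']' ∈ e.toList ∧ '-' ∈ (pvBody e).toList)) : needB fb e = 1 := by
  cases fb with
  | zero => rfl
  | succ f =>
    rw [needB, needBStep]
    have hcond : (PySem.Str.isIn "[" e && PySem.Str.isIn "]" e
        && PySem.Str.isIn "-" (pvBody e)) = false := by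
      rw [pv_isIn_eq (u := "[") (c := '[') (by decide),
        pv_isIn_eq (u := "]") (c := ']') (by decide),
        pv_isIn_eq (u := "-") (c := '-') (by decide)]
      by_cases h1 : '[' ∈ e.toList
      · by_cases h2 : ']' ∈ e.toList
        · by_cases h3 : '-' ∈ (pvBody e).toList
          · exact absurd ⟨h1, h2, h3⟩ h
          · simp [h1, h2, h3]
        · simp [h1, h2]
      · simp [h1]
    rw [hcond]
    rfl

-- one terminal pop of B's loop
lemma pv_main_terminal {e : String} (hc : ',' ∉ e.toList) (hb : '[' ∉ e.toList)
    (fb g : Nat) (S ret : List String) :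
    runB (needB fb e + g) (e :: S) ret = runB g S (ret ++ [e]) := by
  rw [pv_needB_one fb (by rintro ⟨h1, _, _⟩; exact hb h1)]
  rw [show 1 + g = g + 1 from by omega, runB, runBStep]
  rw [pv_isIn_eq (u := ",") (c := ',') (by decide), pv_isIn_eq (u := "[") (c := '[') (by decide)]
  simp [hc, hb]

lemma pv_splitOn_go_mem (c : Char) : ∀ (fuel : Nat) (l cur : List Char) (acc : List (List Char)),
    l.length < fuel → c ∉ cur → ∀ p ∈ PySem.Chars.splitOn.go [c] fuel l cur acc,
    p ∈ acc ∨ (c ∉ p ∧ p.length + l.count c ≤ cur.length + l.length) := by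
  intro fuel
  induction fuel with
  | zero => intro l cur acc h; omega
  | succ fuel ih =>
    intro l cur acc hf hcur p hp
    cases l with
    | nil =>
      simp only [PySem.Chars.splitOn.go] at hp
      simp only [List.mem_reverse, List.mem_cons] at hp
      rcases hp with rfl | hp
      · right
        refine ⟨by simpa using hcur, ?_⟩
        simp
      · left; exact hp
    | cons x rest =>
      by_cases hx : c = x
      · subst hx
        have hpre : [c].isPrefixOf (c :: rest) = true := by simp [List.isPrefixOf]
        simp only [PySem.Chars.splitOn.go, hpre, if_true] at hp
        have hrec := ih rest [] (cur.reverse :: acc) (by simp at hf; omega) (by simp) p hp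
        rcases hrec with hacc | ⟨hcp, hlen⟩
        · rcases List.mem_cons.mp hacc with rfl | hmem
          · right
            refine ⟨by simpa using hcur, ?_⟩
            have := List.count_le_length (a := c) (l := rest)
            simp
            omega
          · left; exact hmem
        · right
          refine ⟨hcp, ?_⟩
          simp only [List.length_nil, Nat.zero_add] at hlen
          simp
          omega
      · have hpre : [c].isPrefixOf (x :: rest) = false := by
          simp [List.isPrefixOf]
          exact fun h => absurd h hx
        simp only [PySem.Chars.splitOn.go, hpre, Bool.false_eq_true, if_false] at hp
        have hrec := ih rest (x :: cur) acc (by simp at hf ⊢; omega)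
          (by
            simp only [List.mem_cons]
            rintro (rfl | h)
            · exact hx rfl
            · exact hcur h) p hp
        rcases hrec with hacc | ⟨hcp, hlen⟩
        · left; exact hacc
        · right
          refine ⟨hcp, ?_⟩
          simp only [List.length_cons] at hlen
          have hcnt : (x :: rest).count c = rest.count c := by
            simp [List.count_cons]
            intro h
            exact absurd h.symm hx
          simp [hcnt]
          omega

lemma pv_parts_facts {expr p : String} (hp : p ∈ (PySem.Str.split? expr ",").getD []) :
    ',' ∉ p.toList ∧ p.toList.length + expr.toList.count ',' ≤ expr.toList.length := by
  have hsplit : PySem.Str.split? expr ","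
      = (PySem.Chars.split? expr.toList [',']).map (List.map String.ofList) := by
    simp [PySem.Str.split?]
  rw [hsplit] at hp
  rw [PySem.Chars.split?, if_neg (by simp)] at hp
  simp only [Option.map_some, Option.getD_some, List.mem_map] at hp
  obtain ⟨q, hq, rfl⟩ := hp
  rw [PySem.Chars.splitOn] at hq
  have hgo := pv_splitOn_go_mem ',' (expr.toList.length + 1) expr.toList [] [] (by omega)
    (by simp) q hq
  rcases hgo with h | ⟨h1, h2⟩
  · cases h
  · constructor
    · rw [String.toList_ofList]; exact h1
    · rw [String.toList_ofList]
      simpa using h2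

-- B processes a stack segment of good comma-free parts exactly as A flattens them
lemma pv_runB_list (f : Nat)
    (IH : ∀ (e : String), ',' ∉ e.toList → e.toList.count '[' ≤ f → GoodC e = true →
      ∀ fb, e.toList.count '[' ≤ fb → ∀ g S ret,
        runB (needB fb e + g) (e :: S) ret = runB g S (ret ++ goA (f + 1) e))
    (φ : String → Nat) :
    ∀ (C : List String),
      (∀ c ∈ C, ',' ∉ c.toList ∧ c.toList.count '[' ≤ f ∧ c.toList.count '[' ≤ φ c ∧ GoodC c = true) →
      ∀ g S ret, runB ((C.map (fun c => needB (φ c) c)).sum + g) (C ++ S) ret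
        = runB g S (ret ++ C.flatMap (fun c => goA (f + 1) c)) := by
  intro C
  induction C with
  | nil => intro _ g S ret; simp
  | cons c C ihC =>
    intro hC g S ret
    have hc := hC c (by simp)
    rw [show ((c :: C).map (fun c => needB (φ c) c)).sum + g
        = needB (φ c) c + ((C.map (fun c => needB (φ c) c)).sum + g) from by simp; omega]
    show runB _ (c :: (C ++ S)) ret = _
    rw [IH c hc.1 hc.2.1 hc.2.2.2 (φ c) hc.2.2.1 _ (C ++ S) ret]
    rw [ihC (fun x hx => hC x (List.mem_cons_of_mem _ hx)) _ S (ret ++ goA (f + 1) c)]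
    simp

-- the core invariant: popping one good comma-free part appends exactly A's expansion of it
lemma pv_main : ∀ (f : Nat) (e : String), ',' ∉ e.toList → e.toList.count '[' ≤ f →
    GoodC e = true → ∀ fb, e.toList.count '[' ≤ fb → ∀ g S ret,
    runB (needB fb e + g) (e :: S) ret = runB g S (ret ++ goA (f + 1) e) := by
  intro f
  induction f with
  | zero =>
    intro e hc hcount _ fb _ g S ret
    have hb : '[' ∉ e.toList := by
      intro hmem
      have := List.count_pos_iff.mpr hmem
      omega
    rw [pv_main_terminal hc hb, pv_goA_terminal e 0 hc hb]
  | succ f ih =>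
    intro e hc hcount hgood fb hfb g S ret
    by_cases hb : '[' ∈ e.toList
    case neg => rw [pv_main_terminal hc hb, pv_goA_terminal e (f + 1) hc hb]
    case pos =>
      have hbpos : 0 < e.toList.count '[' := List.count_pos_iff.mpr hb
      obtain ⟨fb', rfl⟩ : ∃ fb', fb = fb' + 1 := ⟨fb - 1, by omega⟩
      obtain ⟨m, hm⟩ : ∃ m, e.toList.length = m + 1 :=
        ⟨e.toList.length - 1, by have := List.length_pos_of_mem hb; omega⟩
      have hiC : PySem.Str.isIn "," e = false := by
        rw [pv_isIn_eq (u := ",") (c := ',') (by decide)]; simp [hc]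
      have hiB : PySem.Str.isIn "[" e = true := by
        rw [pv_isIn_eq (u := "[") (c := '[') (by decide)]; simp [hb]
      have hgood' := hgood
      rw [GoodC, hm, goGood, goGoodStep, hiB] at hgood'
      simp only [if_true] at hgood'
      by_cases hrb : ']' ∈ e.toList
      case neg =>
        rw [pv_isIn_eq (u := "]") (c := ']') (by decide)] at hgood'
        simp [hrb] at hgood'
      case pos =>
        have hiR : PySem.Str.isIn "]" e = true := by
          rw [pv_isIn_eq (u := "]") (c := ']') (by decide)]; simp [hrb]
        rw [hiR] at hgood'
        simp only [if_true] at hgood'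
        by_cases hd : '-' ∈ (pvBody e).toList
        case neg =>
          have hiD : PySem.Str.isIn "-" (pvBody e) = false := by
            rw [pv_isIn_eq (u := "-") (c := '-') (by decide)]; simp [hd]
          have hA : goA (f + 2) e = [] := by
            rw [goA, goAStep, hiC, hiB, hiR, hiD]
            simp
          have hN : needB (fb' + 1) e = 1 := pv_needB_one _ (by rintro ⟨_, _, h3⟩; exact hd h3)
          rw [hN, hA, show 1 + g = g + 1 from by omega, runB, runBStep, hiC, hiB, hiR, hiD]
          simp
        case pos =>
          have hiD : PySem.Str.isIn "-" (pvBody e) = true := by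
            rw [pv_isIn_eq (u := "-") (c := '-') (by decide)]; simp [hd]
          rw [hiD] at hgood'
          simp only [if_true] at hgood'
          rcases hP : pvParse? (pvBody e) with _ | ⟨a, b⟩
          · rw [hP] at hgood'; simp at hgood'
          · rw [hP] at hgood'
            obtain ⟨s, t, hsp, ha, hb'⟩ := pv_parse_some hP
            obtain ⟨u, v, w, z, heu, hv, hL, hpfx, hew, hz, hR, hsfx, hlr, hbz⟩ :=
              pv_ctx e hb hrb hd
            have hchild : ∀ cc ∈ (PySem.List.pyRange a (b + 1) 1).map (fun i => pvChild e i),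
                ',' ∉ cc.toList ∧ cc.toList.count '[' ≤ f ∧ cc.toList.count '[' ≤ fb'
                  ∧ GoodC cc = true := by
              intro cc hcc
              obtain ⟨i, hi, rfl⟩ := List.mem_map.mp hcc
              have hct : (pvChild e i).toList = u ++ ((PySem.Int.toStr i).toList ++ z) := by
                unfold pvChild
                rw [String.toList_append, String.toList_append, hpfx, hsfx]
                simp [List.append_assoc]
              have hcomma : ',' ∉ (pvChild e i).toList := by
                rw [hct]
                simp only [List.mem_append]
                rintro (h | h | h)
                · exact hc (by rw [heu]; exact List.mem_append.mpr (Or.inl h))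
                · exact pv_toStr_not_mem (by decide) (by decide) i h
                · exact hc (by rw [hew]; simp [h])
              have hcnt : (pvChild e i).toList.count '[' + 1 ≤ e.toList.count '[' := by
                rw [hct, heu]
                have h1 : (PySem.Int.toChars i).count '[' = 0 := by
                  rw [← PySem.Int.toList_toStr]
                  exact List.count_eq_zero.mpr (pv_toStr_not_mem (by decide) (by decide) i)
                have h2 : z.count '[' = 0 := List.count_eq_zero.mpr hbz
                simp [List.count_append, h1, h2]
              have hgoodc : GoodC (pvChild e i) = GoodC (pvPfx e) := by
                rw [GoodC]
                refine pv_goGood_ext _ (pvChild e i) (pvPfx e) ((PySem.Int.toStr i).toList ++ z)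
                  (by rw [hct, hpfx]) ?_ ?_ (le_refl _)
                · simp only [List.mem_append]
                  rintro (h | h)
                  · exact pv_toStr_not_mem (by decide) (by decide) i h
                  · exact hbz h
                · simp only [List.mem_append]
                  rintro (h | h)
                  · exact pv_toStr_not_mem (by decide) (by decide) i h
                  · exact hz h
              have hrange := PySem.List.mem_pyRange_one.mp hi
              have hpg : goGood m (pvPfx e) = true := by
                rcases Bool.or_eq_true_iff.mp hgood' with h | h
                · exact absurd (of_decide_eq_true h) (by omega)
                · exact h
              have hgoodpfx : GoodC (pvPfx e) = true := by
                rw [GoodC, pv_goGood_stable (pvPfx e).toList.length m (pvPfx e) (le_refl _)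
                  (by
                    rw [hpfx]
                    have h7 : u.length < e.toList.length := by rw [heu]; simp
                    omega)]
                exact hpg
              exact ⟨hcomma, by omega, by omega, by rw [hgoodc]; exact hgoodpfx⟩
            have hA : goA (f + 2) e
                = ((PySem.List.pyRange a (b + 1) 1).map (fun i => pvChild e i)).flatMap
                    (fun cc => goA (f + 1) cc) := by
              rw [goA, goAStep, hiC, hiB, hiR, hiD]
              simp only [Bool.false_eq_true, if_false, if_true]
              rw [hsp]
              simp only [ha, hb']
              rw [PySem.List.foldl_append_eq_flatMap, List.flatMap_map]
              simp
            have hN : needB (fb' + 1) e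
                = 1 + (((PySem.List.pyRange a (b + 1) 1).map (fun i => pvChild e i)).map
                    (fun cc => needB fb' cc)).sum := by
              rw [needB, needBStep, hiB, hiR, hiD]
              simp only [Bool.and_self, if_true]
              rw [hP, List.map_map]
              rfl
            rw [hN, hA,
              show (1 + (((PySem.List.pyRange a (b + 1) 1).map (fun i => pvChild e i)).map
                  (fun cc => needB fb' cc)).sum) + g
                = ((((PySem.List.pyRange a (b + 1) 1).map (fun i => pvChild e i)).map
                  (fun cc => needB fb' cc)).sum + g) + 1 from by omega,
              runB, runBStep, hiC, hiB, hiR, hiD]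
            simp only [Bool.false_eq_true, if_false, if_true]
            rw [hsp]
            simp only [ha, hb']
            exact pv_runB_list f ih (fun _ => fb') _ hchild g S ret

-- ===== VERDICT (by name: the statement is the Claim_ definition above) =====
theorem show_hostnames_py_spec : Claim_equal_show_hostnames_py := by
  intro expr _ hpre
  unfold Spec_show_hostnames_py show_hostnames_py show_hostnames_py_alt
  by_cases hc : ',' ∈ expr.toList
  · obtain ⟨m, hm⟩ : ∃ m, expr.toList.length = m + 1 :=
      ⟨expr.toList.length - 1, by have := List.length_pos_of_mem hc; omega⟩
    have hiC : PySem.Str.isIn "," expr = true := by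
      rw [pv_isIn_eq (u := ",") (c := ',') (by decide)]; simp [hc]
    have hparts : ∀ p ∈ (PySem.Str.split? expr ",").getD [],
        ',' ∉ p.toList ∧ p.toList.count '[' ≤ m ∧ p.toList.count '[' ≤ p.toList.length
          ∧ GoodC p = true := by
      intro p hp
      obtain ⟨h1, h2⟩ := pv_parts_facts hp
      have hcnt : 0 < expr.toList.count ',' := List.count_pos_iff.mpr hc
      have h3 : p.toList.length ≤ m := by omega
      exact ⟨h1, le_trans List.count_le_length h3, List.count_le_length, hpre p hp⟩
    have hB : runB (1 + (((PySem.Str.split? expr ",").getD []).map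
          (fun p => needB p.toList.length p)).sum) [expr] []
        = ((PySem.Str.split? expr ",").getD []).flatMap (fun c => goA (m + 1) c) := by
      rw [show 1 + (((PySem.Str.split? expr ",").getD []).map
            (fun p => needB p.toList.length p)).sum
          = (((PySem.Str.split? expr ",").getD []).map
            (fun p => needB p.toList.length p)).sum + 1 from by omega,
        runB, runBStep, hiC]
      simp only [if_true]
      have hlist := pv_runB_list m (pv_main m) (fun p => p.toList.length)
        ((PySem.Str.split? expr ",").getD []) hparts 0 [] []
      simp only [Nat.add_zero, List.nil_append] at hlist
      rw [hlist, pv_runB_nil]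
    have hA : goA (expr.toList.length + 1) expr
        = ((PySem.Str.split? expr ",").getD []).flatMap (fun c => goA (m + 1) c) := by
      rw [hm, goA, goAStep, hiC]
      simp only [if_true]
      rw [PySem.List.foldl_append_eq_flatMap]
      simp
    rw [hA, hB]
  · have hparts : (PySem.Str.split? expr ",").getD [] = [expr] := pv_split_self expr hc
    have hgood : GoodC expr = true := hpre expr (by rw [hparts]; simp)
    rw [hparts]
    simp only [List.map_cons, List.map_nil, List.sum_cons, List.sum_nil]
    rw [show 1 + (needB expr.toList.length expr + 0) = needB expr.toList.length expr + 1 from by omega]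
    rw [pv_main expr.toList.length expr hc List.count_le_length hgood expr.toList.length
      List.count_le_length 1 [] []]
    rw [pv_runB_nil]
    simp
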